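-- pv_equiv track=rewrite | github.com/dododoSA/Models4RL | models/Qlearning/Qlearning.py | generate_state_index
-- ===== SOURCE A (Python) =====
-- def generate_state_index(discretized, discretized_nums):
--     index = 0
--     for i, x in enumerate(discretized):
--         digit = 1
--         for j in range(i):
--             digit *= discretized_nums[j]
--         index += x * digit
--
--     return index
-- ===== SOURCE B (Python) =====
-- def generate_state_index(discretized, discretized_nums):
--     index = 0
--     multiplier = 1
--     for x, n in zip(discretized, discretized_nums + [1]):
--         index += x * multiplier
--         multiplier *= n
--     return index
-- ===== Notes on version B (the rewrite author's own statement) =====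
-- stated objective: faster
-- what changed: Replaced the nested loop that recomputes the product-of-radices prefix from scratch for every position with a single pass over zip(discretized, discretized_nums + [1]) that maintains a running multiplier.
import Mathlib
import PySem

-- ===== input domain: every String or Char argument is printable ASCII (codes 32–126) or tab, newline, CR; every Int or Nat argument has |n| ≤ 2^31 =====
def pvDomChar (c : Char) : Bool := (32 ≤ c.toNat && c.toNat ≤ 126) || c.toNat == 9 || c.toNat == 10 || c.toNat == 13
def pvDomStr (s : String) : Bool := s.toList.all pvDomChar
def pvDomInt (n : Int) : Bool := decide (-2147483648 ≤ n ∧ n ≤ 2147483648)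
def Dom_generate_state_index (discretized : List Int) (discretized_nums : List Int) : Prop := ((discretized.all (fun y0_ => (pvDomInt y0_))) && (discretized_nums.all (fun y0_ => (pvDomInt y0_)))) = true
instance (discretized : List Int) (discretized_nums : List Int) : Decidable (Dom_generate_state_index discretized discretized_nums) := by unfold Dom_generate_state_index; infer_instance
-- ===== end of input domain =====

-- ===== PORT A =====
-- B is a single pass with a running multiplier instead of A's nested recomputation (O(n) vs O(n^2)).
-- pyGetD is exact here: Pre_ guarantees every index discretized_nums[j] is in range (j < len(discretized)-1 <= len(discretized_nums)).
def generate_state_index (discretized : List Int) (discretized_nums : List Int) : Int :=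
  (PySem.List.enumerate discretized).foldl
    (fun index ix =>
      let digit := (PySem.List.pyRange 0 ix.1 1).foldl
        (fun digit j => digit * PySem.List.pyGetD discretized_nums j 0) 1
      index + ix.2 * digit) 0

-- ===== PORT B =====
def generate_state_index_alt (discretized : List Int) (discretized_nums : List Int) : Int :=
  ((List.zip discretized (discretized_nums ++ [1])).foldl
    (fun s p => (s.1 + p.1 * s.2, s.2 * p.2)) (0, 1)).1

-- ===== PRECONDITION & SPEC =====
-- Pre_ excludes exactly the inputs where A raises IndexError (it needs discretized_nums[j] for every j < len(discretized) - 1).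
def Pre_generate_state_index (discretized : List Int) (discretized_nums : List Int) : Prop :=
  discretized.length ≤ discretized_nums.length + 1
instance (discretized : List Int) (discretized_nums : List Int) : Decidable (Pre_generate_state_index discretized discretized_nums) := by unfold Pre_generate_state_index; infer_instance
def pvWitness_generate_state_index : List Int × List Int := ([1, 2], [3, 4])

def Spec_generate_state_index (discretized : List Int) (discretized_nums : List Int) (out : Int) : Prop := out = generate_state_index_alt discretized discretized_nums
instance (discretized : List Int) (discretized_nums : List Int) (out : Int) : Decidable (Spec_generate_state_index discretized discretized_nums out) := by unfold Spec_generate_state_index; infer_instance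

-- ===== CLAIM (what is proved, stated in full; the proofs are below) =====
def Claim_equal_generate_state_index : Prop := ∀ (discretized : List Int) (discretized_nums : List Int), Dom_generate_state_index discretized discretized_nums → Pre_generate_state_index discretized discretized_nums → Spec_generate_state_index discretized discretized_nums (generate_state_index discretized discretized_nums)

-- ===== LEMMAS AND PROOFS =====
-- Reference mixed-radix value: H d ns = d0 + n0*(d1 + n1*(...)).
def pvH : List Int → List Int → Int
  | [], _ => 0
  | _ :: _, [] => 0
  | x :: d, n :: ns => x + n * pvH d ns

lemma pvB_fold (d ns : List Int) : ∀ (acc m : Int),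
    ((List.zip d ns).foldl (fun s p => (s.1 + p.1 * s.2, s.2 * p.2)) (acc, m)).1
      = acc + m * pvH d ns := by
  induction d generalizing ns with
  | nil => intro acc m; simp [pvH]
  | cons x d ih =>
    intro acc m
    cases ns with
    | nil => simp [pvH]
    | cons n ns =>
      simp only [List.zip_cons_cons, List.foldl_cons, pvH]
      rw [ih]
      ring

lemma pv_digit (nums : List Int) (k : Nat) (hk : k ≤ nums.length) :
    (PySem.List.pyRange 0 (k : Int) 1).foldl
      (fun digit j => digit * PySem.List.pyGetD nums j 0) 1 = (nums.take k).prod := by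
  induction k with
  | zero => simp [PySem.List.pyRange_one_eq_nil]
  | succ k ih =>
    have hk' : k < nums.length := by omega
    rw [show ((k + 1 : Nat) : Int) = (k : Int) + 1 by push_cast; ring,
        PySem.List.pyRange_one_succ_right (by omega : (0:Int) ≤ (k:Int)),
        List.foldl_append, ih (by omega), List.foldl_cons, List.foldl_nil,
        PySem.List.pyGetD_natCast, List.prod_take_succ _ _ hk',
        List.getD_eq_getElem _ _ hk']

lemma pvA_gen (nums : List Int) : ∀ (d : List Int) (k : Nat) (acc : Int),
    k + d.length ≤ nums.length + 1 →
    (PySem.List.enumerate d (k : Int)).foldl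
      (fun index ix =>
        let digit := (PySem.List.pyRange 0 ix.1 1).foldl
          (fun digit j => digit * PySem.List.pyGetD nums j 0) 1
        index + ix.2 * digit) acc
      = acc + (nums.take k).prod * pvH d (nums.drop k ++ [1]) := by
  intro d
  induction d with
  | nil => intro k acc _; simp [PySem.List.enumerate_nil, pvH]
  | cons x d ih =>
    intro k acc hlen
    rw [List.length_cons] at hlen
    rw [PySem.List.enumerate_cons, List.foldl_cons]
    simp only
    rw [pv_digit nums k (by omega),
        show ((k : Int) + 1) = ((k + 1 : Nat) : Int) by push_cast; ring,
        ih (k + 1) _ (by omega)]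
    by_cases hk : k < nums.length
    · rw [List.drop_eq_getElem_cons hk]
      simp only [List.cons_append, pvH]
      rw [List.prod_take_succ _ _ hk]
      ring
    · have hke : k = nums.length := by omega
      have hd : d = [] := by
        have : d.length = 0 := by omega
        exact List.length_eq_zero_iff.mp this
      subst hd hke
      simp [pvH]
      ring

-- ===== VERDICT (by name: the statement is the Claim_ definition above) =====
theorem generate_state_index_spec : Claim_equal_generate_state_index := by
  intro d nums _ hpre
  unfold Spec_generate_state_index generate_state_index generate_state_index_alt
  unfold Pre_generate_state_index at hpre
  have hA := pvA_gen nums d 0 0 (by omega)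
  simp only [Nat.cast_zero, List.take_zero, List.prod_nil, List.drop_zero, zero_add, one_mul] at hA
  rw [hA, pvB_fold d (nums ++ [1]) 0 1]
  ring
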